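-- pv_equiv track=rewrite | github.com/seniortasse/SudokuCompanionToolkit-v3 | python/mobile/android/app/src/main/python/normalize_detour.py | _ordered_house_scan_refs
-- ===== SOURCE A (Python) =====
-- from typing import Any, Dict, List, Optional
--
-- def _ordered_house_scan_refs(local_proof_geometry: Dict[str, Any]) -> List[str]:
--     geom = local_proof_geometry if isinstance(local_proof_geometry, dict) else {}
--     houses = [str(h) for h in (geom.get("houses") or []) if str(h).strip()]
--     if not houses:
--         return []
--
--     scan_order = [str(x).strip().upper() for x in (geom.get("scan_order") or []) if str(x).strip()]
--     prefix_for_scan = {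
--         "ROW": "row",
--         "COLUMN": "col",
--         "COL": "col",
--         "BOX": "box",
--     }
--
--     ordered: List[str] = []
--     for token in scan_order:
--         prefix = prefix_for_scan.get(token)
--         if not prefix:
--             continue
--         match = next((house for house in houses if house.startswith(prefix) and house not in ordered), None)
--         if match:
--             ordered.append(match)
--
--     for house in houses:
--         if house not in ordered:
--             ordered.append(house)
--
--     return ordered
-- ===== SOURCE B (Python) =====
-- from typing import Any, Dict, List, Optional
--
-- def _ordered_house_scan_refs(local_proof_geometry: Dict[str, Any]) -> List[str]:
--     geom = local_proof_geometry if isinstance(local_proof_geometry, dict) else {}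
--
--     # Deduplicated (first occurrence), stripped-non-empty house names, in order.
--     houses: List[str] = []
--     seen = set()
--     for h in (geom.get("houses") or []):
--         s = str(h)
--         if s.strip() and s not in seen:
--             seen.add(s)
--             houses.append(s)
--
--     # One ordered queue per prefix; a house can start with at most one prefix.
--     queues = {"row": [], "col": [], "box": []}
--     for h in houses:
--         for p in ("row", "col", "box"):
--             if h.startswith(p):
--                 queues[p].append(h)
--                 break
--     its = {p: iter(q) for p, q in queues.items()}
--
--     prefix_for_scan = {"ROW": "row", "COLUMN": "col", "COL": "col", "BOX": "box"}
--     used = set()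
--     ordered: List[str] = []
--     for x in (geom.get("scan_order") or []):
--         t = str(x).strip()
--         if not t:
--             continue
--         p = prefix_for_scan.get(t.upper())
--         if p is None:
--             continue
--         h = next(its[p], None)
--         if h is not None:
--             used.add(h)
--             ordered.append(h)
--
--     ordered.extend(h for h in houses if h not in used)
--     return ordered
-- ===== Notes on version B (the rewrite author's own statement) =====
-- stated objective: alternative
-- what changed: B deduplicates the filtered houses once, pre-builds one ordered queue per prefix (row/col/box) consumed head-first via iterators, and tracks used houses in a set, replacing A's per-token linear rescan of houses with a 'not in ordered' list-membership test inside it.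
import Mathlib
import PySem

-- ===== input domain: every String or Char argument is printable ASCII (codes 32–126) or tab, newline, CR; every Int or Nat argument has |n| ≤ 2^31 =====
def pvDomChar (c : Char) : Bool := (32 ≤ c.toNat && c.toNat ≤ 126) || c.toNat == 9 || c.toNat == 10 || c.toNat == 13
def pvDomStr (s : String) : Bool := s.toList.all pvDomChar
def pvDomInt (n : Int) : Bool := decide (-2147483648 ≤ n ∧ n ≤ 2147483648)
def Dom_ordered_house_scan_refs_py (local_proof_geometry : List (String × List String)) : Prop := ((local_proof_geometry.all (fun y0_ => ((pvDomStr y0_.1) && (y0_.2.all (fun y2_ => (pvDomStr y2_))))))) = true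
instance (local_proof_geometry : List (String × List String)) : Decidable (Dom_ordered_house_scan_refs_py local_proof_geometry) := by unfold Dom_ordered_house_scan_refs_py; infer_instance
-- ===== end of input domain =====

-- ===== PORT A =====
-- B replaces A's per-token linear scan of `houses` (with a `not in ordered` list test inside it)
-- by dedup + per-prefix queues consumed head-first + a used-set; return values proved equal.
def pvPF : PySem.Dict String String :=
  ⟨[("ROW", "row"), ("COLUMN", "col"), ("COL", "col"), ("BOX", "box")]⟩

def pvStepA (houses ordered : List String) (token : String) : List String :=
  match PySem.Dict.get? pvPF token with
  | none => ordered
  | some pfx =>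
      if pfx == "" then ordered
      else
        match houses.find? (fun h => PySem.Str.startswith h pfx && !(ordered.contains h)) with
        | none => ordered
        | some m => if m == "" then ordered else ordered ++ [m]

def ordered_house_scan_refs_py (local_proof_geometry : List (String × List String)) : List String :=
  let houses := (PySem.Dict.getD ⟨local_proof_geometry⟩ "houses" []).filter
      (fun h => PySem.Str.strip h != "")
  if houses == [] then []
  else
    let scan_order := ((PySem.Dict.getD ⟨local_proof_geometry⟩ "scan_order" []).filter
        (fun x => PySem.Str.strip x != "")).map (fun x => PySem.Str.upper (PySem.Str.strip x))
    let ordered := scan_order.foldl (pvStepA houses) []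
    houses.foldl (fun o h => if o.contains h then o else o ++ [h]) ordered

-- ===== PORT B =====
def pvPFB : PySem.Dict String String :=
  ⟨[("ROW", "row"), ("COLUMN", "col"), ("COL", "col"), ("BOX", "box")]⟩

def pvDedupStep (ac : List String × PySem.Set String) (s : String) :
    List String × PySem.Set String :=
  if PySem.Str.strip s != "" && !(PySem.Set.contains ac.2 s) then
    (ac.1 ++ [s], PySem.Set.add ac.2 s)
  else ac

def pvAddQueue (qs : PySem.Dict String (List String)) (h : String) :
    PySem.Dict String (List String) :=
  if PySem.Str.startswith h "row" then qs.modify "row" [] (· ++ [h])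
  else if PySem.Str.startswith h "col" then qs.modify "col" [] (· ++ [h])
  else if PySem.Str.startswith h "box" then qs.modify "box" [] (· ++ [h])
  else qs

def pvStepB (st : PySem.Dict String (List String) × PySem.Set String × List String)
    (x : String) : PySem.Dict String (List String) × PySem.Set String × List String :=
  let t := PySem.Str.strip x
  if t == "" then st
  else
    match PySem.Dict.get? pvPFB (PySem.Str.upper t) with
    | none => st
    | some p =>
        match PySem.Dict.getD st.1 p [] with
        | [] => st
        | h :: rest => (st.1.insert p rest, PySem.Set.add st.2.1 h, st.2.2 ++ [h])

def ordered_house_scan_refs_py_alt (local_proof_geometry : List (String × List String)) :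
    List String :=
  let houses := ((PySem.Dict.getD ⟨local_proof_geometry⟩ "houses" []).foldl pvDedupStep
      ([], PySem.Set.empty)).1
  let its := houses.foldl pvAddQueue ⟨[("row", []), ("col", []), ("box", [])]⟩
  let st := (PySem.Dict.getD ⟨local_proof_geometry⟩ "scan_order" []).foldl pvStepB
      (its, PySem.Set.empty, [])
  st.2.2 ++ houses.filter (fun h => !(PySem.Set.contains st.2.1 h))

-- ===== PRECONDITION & SPEC =====
def Spec_ordered_house_scan_refs_py (local_proof_geometry : List (String × List String)) (out : List String) : Prop := out = ordered_house_scan_refs_py_alt local_proof_geometry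
instance (local_proof_geometry : List (String × List String)) (out : List String) : Decidable (Spec_ordered_house_scan_refs_py local_proof_geometry out) := by unfold Spec_ordered_house_scan_refs_py; infer_instance

-- ===== CLAIM (what is proved, stated in full; the proofs are below) =====
def Claim_equal_ordered_house_scan_refs_py : Prop := ∀ (local_proof_geometry : List (String × List String)), Dom_ordered_house_scan_refs_py local_proof_geometry → Spec_ordered_house_scan_refs_py local_proof_geometry (ordered_house_scan_refs_py local_proof_geometry)

-- ===== LEMMAS AND PROOFS =====

-- dedup-and-filter of the raw house list relative to an already-seen list
def pvDDF (seen : List String) : List String → List String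
  | [] => []
  | s :: t =>
      if PySem.Str.strip s != "" && !(seen.contains s) then s :: pvDDF (seen ++ [s]) t
      else pvDDF seen t

lemma pvSet_contains_add (s : PySem.Set String) (x y : String) :
    PySem.Set.contains (PySem.Set.add s x) y = (PySem.Set.contains s y || y == x) := by
  simp [PySem.Set.contains, PySem.Set.add]
  by_cases h : x ∈ s <;> by_cases h2 : y = x <;> simp_all

lemma pvPF_cases (tok p : String) (h : PySem.Dict.get? pvPF tok = some p) :
    p = "row" ∨ p = "col" ∨ p = "box" := by
  simp only [pvPF, PySem.Dict.get?, List.find?] at h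
  repeat' split at h
  all_goals simp_all
lemma pvPFB_eq : pvPFB = pvPF := rfl

lemma pv_excl (h p q : String) (hp : p ∈ (["row", "col", "box"] : List String))
    (hq : q ∈ (["row", "col", "box"] : List String)) (hne : p ≠ q)
    (hs : PySem.Str.startswith h p = true) : PySem.Str.startswith h q = false := by
  by_contra hc
  rw [Bool.not_eq_false] at hc
  rw [PySem.Str.startswith_eq, PySem.Chars.startswith_iff] at hs hc
  fin_cases hp <;> fin_cases hq <;> simp_all <;>
    exact absurd (List.prefix_of_prefix_length_le hs hc (by decide)) (by decide)
lemma pv_sw_ne_empty (h p : String) (hp : p ∈ (["row", "col", "box"] : List String))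
    (hs : PySem.Str.startswith h p = true) : (h == "") = false := by
  by_contra hc
  rw [Bool.not_eq_false, beq_iff_eq] at hc
  subst hc
  rw [PySem.Str.startswith_eq, PySem.Chars.startswith_iff] at hs
  fin_cases hp <;> revert hs <;> decide
lemma pvDDF_congr (l : List String) (s1 s2 : List String)
    (hc : ∀ x, x ∈ s1 ↔ x ∈ s2) : pvDDF s1 l = pvDDF s2 l := by
  induction l generalizing s1 s2 with
  | nil => rfl
  | cons s t ih =>
    have hcb : s1.contains s = s2.contains s := by simp [hc s]
    simp only [pvDDF, hcb]
    split
    · exact congrArg (s :: ·) (ih _ _ (fun x => by simp [hc x]))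
    · exact ih _ _ hc
lemma pvDDF_filter (raw : List String) (seen ord : List String) :
    (pvDDF seen raw).filter (fun h => !ord.contains h) = pvDDF (seen ++ ord) raw := by
  induction raw generalizing seen with
  | nil => rfl
  | cons s t ih =>
    simp only [pvDDF]
    by_cases h1 : (PySem.Str.strip s != "") = true
    · by_cases h2 : s ∈ seen
      · rw [if_neg (by simp [h2]), if_neg (by simp [h2]), ih]
      · by_cases h3 : s ∈ ord
        · rw [if_pos (by simp [h1, h2]), if_neg (by simp [h2, h3])]
          rw [List.filter_cons_of_neg (by simp [h3]), ih]
          exact pvDDF_congr _ _ _ (fun x => by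
            simp only [List.mem_append, List.mem_singleton]
            constructor
            · rintro ((h | rfl) | h)
              exacts [Or.inl h, Or.inr h3, Or.inr h]
            · rintro (h | h)
              exacts [Or.inl (Or.inl h), Or.inr h])
        · rw [if_pos (by simp [h1, h2]), if_pos (by simp [h1, h2, h3])]
          rw [List.filter_cons_of_pos (by simp [h3]), ih]
          exact congrArg (s :: ·) (pvDDF_congr _ _ _ (fun x => by
            simp only [List.mem_append, List.mem_singleton]
            tauto))
    · rw [if_neg (by simp [h1]), if_neg (by simp [h1]), ih]
lemma pvDDF_find (raw : List String) (seen : List String) (pred : String → Bool)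
    (hs : ∀ x ∈ seen, pred x = false) :
    (raw.filter (fun h => PySem.Str.strip h != "")).find? pred = (pvDDF seen raw).find? pred := by
  induction raw generalizing seen with
  | nil => rfl
  | cons s t ih =>
    simp only [pvDDF, List.filter_cons]
    by_cases h1 : (PySem.Str.strip s != "") = true
    · by_cases h2 : s ∈ seen
      · rw [if_pos h1, if_neg (by simp [h2]), List.find?_cons_of_neg (by simp [hs s h2]),
          ih seen hs]
      · rw [if_pos h1, if_pos (by simp [h1, h2])]
        by_cases hp : pred s = true
        · rw [List.find?_cons_of_pos hp, List.find?_cons_of_pos hp]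
        · have hp' := eq_false_of_ne_true hp
          rw [List.find?_cons_of_neg (by simp [hp']), List.find?_cons_of_neg (by simp [hp'])]
          exact ih (seen ++ [s]) (fun x hx => by
            rcases List.mem_append.mp hx with h | h
            · exact hs x h
            · simp at h; subst h; exact hp')
    · rw [if_neg (by simp [h1]), if_neg (by simp [h1]), ih seen hs]
lemma pvDDF_nodup (raw : List String) (seen : List String) :
    (pvDDF seen raw).Nodup ∧ ∀ x ∈ pvDDF seen raw, x ∉ seen := by
  induction raw generalizing seen with
  | nil => simp [pvDDF]
  | cons s t ih =>
    simp only [pvDDF]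
    by_cases h1 : (PySem.Str.strip s != "") = true
    · by_cases h2 : s ∈ seen
      · rw [if_neg (by simp [h2])]
        exact ⟨(ih seen).1, (ih seen).2⟩
      · rw [if_pos (by simp [h1, h2])]
        obtain ⟨hnd, hns⟩ := ih (seen ++ [s])
        refine ⟨List.nodup_cons.mpr ⟨fun hmem => by simpa using hns s hmem, hnd⟩, ?_⟩
        intro x hx
        rcases List.mem_cons.mp hx with rfl | hx
        · exact h2
        · exact fun hxs => hns x hx (List.mem_append.mpr (Or.inl hxs))
    · simp only [h1, Bool.false_and, if_neg Bool.false_ne_true]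
      exact ih seen
lemma pvDDF_nil (raw : List String)
    (h : raw.filter (fun h => PySem.Str.strip h != "") = []) (seen : List String) :
    pvDDF seen raw = [] := by
  induction raw generalizing seen with
  | nil => rfl
  | cons s t ih =>
    simp only [List.filter_cons] at h
    by_cases h1 : (PySem.Str.strip s != "") = true
    · simp [h1] at h
    · simp only [h1, if_neg Bool.false_ne_true] at h
      simp only [pvDDF, h1, Bool.false_and, if_neg Bool.false_ne_true]
      exact ih h seen
lemma pvDedup_fold (raw : List String) (acc : List String) (seen : PySem.Set String)
    (hc : ∀ x, PySem.Set.contains seen x = acc.contains x) :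
    (raw.foldl pvDedupStep (acc, seen)).1 = acc ++ pvDDF acc raw := by
  induction raw generalizing acc seen with
  | nil => simp [pvDDF]
  | cons s t ih =>
    simp only [List.foldl_cons, pvDedupStep, pvDDF, hc s]
    by_cases h1 : (PySem.Str.strip s != "") = true
    · by_cases h2 : s ∈ acc
      · rw [if_neg (by simp [h2]), if_neg (by simp [h2])]
        exact ih acc seen hc
      · rw [if_pos (by simp [h1, h2]), if_pos (by simp [h1, h2])]
        rw [ih (acc ++ [s]) (PySem.Set.add seen s) (fun x => by
          rw [pvSet_contains_add, hc x]
          by_cases hx : x ∈ acc <;> by_cases hy : x = s <;> simp_all)]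
        simp
    · rw [if_neg (by simp [h1]), if_neg (by simp [h1])]
      exact ih acc seen hc
lemma pvQueues_fold (hs : List String) (qs : PySem.Dict String (List String)) :
    ∀ p ∈ (["row", "col", "box"] : List String),
      (hs.foldl pvAddQueue qs).getD p [] =
        qs.getD p [] ++ hs.filter (fun h => PySem.Str.startswith h p) := by
  induction hs generalizing qs with
  | nil => simp
  | cons h t ih =>
    intro p hp
    rw [List.foldl_cons, ih (pvAddQueue qs h) p hp, List.filter_cons]
    have key : (pvAddQueue qs h).getD p [] =
        qs.getD p [] ++ (if PySem.Str.startswith h p then [h] else []) := by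
      unfold pvAddQueue
      by_cases hr : PySem.Str.startswith h "row" = true
      · have e1 := pv_excl h "row" "col" (by simp) (by simp) (by decide) hr
        have e2 := pv_excl h "row" "box" (by simp) (by simp) (by decide) hr
        rw [if_pos hr, PySem.Dict.getD_modify]
        fin_cases hp <;> simp_all
      · rw [if_neg hr]
        by_cases hcl : PySem.Str.startswith h "col" = true
        · have e1 := pv_excl h "col" "box" (by simp) (by simp) (by decide) hcl
          rw [if_pos hcl, PySem.Dict.getD_modify]
          fin_cases hp <;> simp_all
        · rw [if_neg hcl]
          by_cases hb : PySem.Str.startswith h "box" = true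
          · rw [if_pos hb, PySem.Dict.getD_modify]
            fin_cases hp <;> simp_all
          · rw [if_neg hb]
            fin_cases hp <;> simp_all
    rw [key]
    by_cases hsp : PySem.Str.startswith h p = true
    · rw [if_pos hsp, if_pos hsp, List.append_assoc]
      rfl
    · rw [if_neg hsp, if_neg hsp, List.append_nil]
lemma pvPhase2 (raw : List String) (ord : List String) :
    (raw.filter (fun h => PySem.Str.strip h != "")).foldl
        (fun o h => if o.contains h then o else o ++ [h]) ord = ord ++ pvDDF ord raw := by
  induction raw generalizing ord with
  | nil => simp [pvDDF]
  | cons s t ih =>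
    simp only [List.filter_cons, pvDDF]
    by_cases h1 : (PySem.Str.strip s != "") = true
    · by_cases h2 : s ∈ ord
      · rw [if_pos h1, if_neg (by simp [h2]), List.foldl_cons, if_pos (by simp [h2]), ih]
      · rw [if_pos h1, if_pos (by simp [h1, h2]), List.foldl_cons, if_neg (by simp [h2]),
          ih (ord ++ [s]), List.append_assoc]
        rfl
    · rw [if_neg (by simp [h1]), if_neg (by simp [h1]), ih]
-- B's scan step on an already stripped-uppercased non-empty token
def pvStepB' (st : PySem.Dict String (List String) × PySem.Set String × List String)
    (tok : String) : PySem.Dict String (List String) × PySem.Set String × List String :=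
  match PySem.Dict.get? pvPFB tok with
  | none => st
  | some p =>
      match PySem.Dict.getD st.1 p [] with
      | [] => st
      | h :: rest => (st.1.insert p rest, PySem.Set.add st.2.1 h, st.2.2 ++ [h])

lemma pvStepB_align (xs : List String)
    (st : PySem.Dict String (List String) × PySem.Set String × List String) :
    xs.foldl pvStepB st =
      ((xs.filter (fun x => PySem.Str.strip x != "")).map
          (fun x => PySem.Str.upper (PySem.Str.strip x))).foldl pvStepB' st := by
  induction xs generalizing st with
  | nil => rfl
  | cons x t ih =>
    simp only [List.foldl_cons, List.filter_cons]
    by_cases h1 : (PySem.Str.strip x != "") = true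
    · rw [if_pos h1, List.map_cons, List.foldl_cons]
      have : pvStepB st x = pvStepB' st (PySem.Str.upper (PySem.Str.strip x)) := by
        simp only [pvStepB, pvStepB']
        rw [if_neg (by simpa using h1)]
      rw [this, ih]
    · rw [if_neg h1]
      have : pvStepB st x = st := by
        simp only [pvStepB]
        rw [if_pos (by simpa using h1)]
      rw [this, ih]
lemma pvMainInd (raw : List String) (S : List String) (oA : List String)
    (its : PySem.Dict String (List String)) (used : PySem.Set String)
    (hu : ∀ x, PySem.Set.contains used x = oA.contains x)
    (hq : ∀ p ∈ (["row", "col", "box"] : List String),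
      its.getD p [] = ((pvDDF [] raw).filter (fun h => PySem.Str.startswith h p)).filter
          (fun h => !oA.contains h)) :
    (S.foldl pvStepB' (its, used, oA)).2.2 =
        S.foldl (pvStepA (raw.filter (fun h => PySem.Str.strip h != ""))) oA ∧
    (∀ x, PySem.Set.contains (S.foldl pvStepB' (its, used, oA)).2.1 x =
        (S.foldl (pvStepA (raw.filter (fun h => PySem.Str.strip h != ""))) oA).contains x) ∧
    (∀ p ∈ (["row", "col", "box"] : List String),
      (S.foldl pvStepB' (its, used, oA)).1.getD p [] =
        ((pvDDF [] raw).filter (fun h => PySem.Str.startswith h p)).filter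
          (fun h => !(S.foldl (pvStepA (raw.filter (fun h => PySem.Str.strip h != ""))) oA).contains h)) := by
  induction S generalizing oA its used with
  | nil => exact ⟨rfl, hu, hq⟩
  | cons tok T ih =>
    simp only [List.foldl_cons]
    cases hg : PySem.Dict.get? pvPF tok with
    | none =>
      have hA : pvStepA (raw.filter (fun h => PySem.Str.strip h != "")) oA tok = oA := by
        simp only [pvStepA, hg]
      have hB : pvStepB' (its, used, oA) tok = (its, used, oA) := by
        simp only [pvStepB', pvPFB_eq, hg]
      rw [hA, hB]
      exact ih oA its used hu hq
    | some p =>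
      have hp : p ∈ (["row", "col", "box"] : List String) := by
        rcases pvPF_cases tok p hg with rfl | rfl | rfl <;> simp
      have hpe : (p == "") = false := by
        rcases pvPF_cases tok p hg with rfl | rfl | rfl <;> decide
      have hDnd : (pvDDF [] raw).Nodup := (pvDDF_nodup raw []).1
      have hfind : (raw.filter (fun h => PySem.Str.strip h != "")).find?
            (fun h => PySem.Str.startswith h p && !(oA.contains h)) =
          (((pvDDF [] raw).filter (fun h => PySem.Str.startswith h p)).filter
            (fun h => !(oA.contains h))).head? := by
        rw [pvDDF_find raw [] _ (by simp), ← List.head?_filter, List.filter_filter]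
        congr 1
        apply List.filter_congr
        intro a _
        rw [Bool.and_comm]
      cases hQ : ((pvDDF [] raw).filter (fun h => PySem.Str.startswith h p)).filter
          (fun h => !(oA.contains h)) with
      | nil =>
        have hA : pvStepA (raw.filter (fun h => PySem.Str.strip h != "")) oA tok = oA := by
          simp only [pvStepA, hg, hpe, Bool.false_eq_true, if_false]
          rw [hfind, hQ]
          rfl
        have hB : pvStepB' (its, used, oA) tok = (its, used, oA) := by
          simp only [pvStepB', pvPFB_eq, hg]
          rw [hq p hp, hQ]
        rw [hA, hB]
        exact ih oA its used hu hq
      | cons m rest =>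
        have hmQ : m ∈ ((pvDDF [] raw).filter (fun h => PySem.Str.startswith h p)).filter
            (fun h => !(oA.contains h)) := by rw [hQ]; exact List.mem_cons_self
        have hm1 : m ∈ (pvDDF [] raw).filter (fun h => PySem.Str.startswith h p) :=
          List.mem_of_mem_filter hmQ
        have hm_sw : PySem.Str.startswith m p = true := by
          simpa using List.of_mem_filter hm1
        have hme : (m == "") = false := pv_sw_ne_empty m p hp hm_sw
        have hmr : m ∉ rest := by
          have : (((pvDDF [] raw).filter (fun h => PySem.Str.startswith h p)).filter
              (fun h => !(oA.contains h))).Nodup := (hDnd.filter _).filter _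
          rw [hQ] at this
          exact (List.nodup_cons.mp this).1
        have hA : pvStepA (raw.filter (fun h => PySem.Str.strip h != "")) oA tok = oA ++ [m] := by
          simp only [pvStepA, hg, hpe, Bool.false_eq_true, if_false]
          rw [hfind, hQ]
          simp [hme]
        have hB : pvStepB' (its, used, oA) tok =
            (its.insert p rest, PySem.Set.add used m, oA ++ [m]) := by
          simp only [pvStepB', pvPFB_eq, hg]
          rw [hq p hp, hQ]
        rw [hA, hB]
        have hsplit : ∀ (l : List String), l.filter (fun h => !((oA ++ [m]).contains h)) =
            (l.filter (fun h => !(oA.contains h))).filter (fun h => !(h == m)) := by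
          intro l
          rw [List.filter_filter]
          apply List.filter_congr
          intro h _
          by_cases h1 : h ∈ oA <;> by_cases h2 : h = m <;> simp_all
        refine ih (oA ++ [m]) (its.insert p rest) (PySem.Set.add used m) ?_ ?_
        · intro x
          rw [pvSet_contains_add, hu x]
          by_cases h1 : x ∈ oA <;> by_cases h2 : x = m <;> simp_all
        · intro q hqm
          rw [PySem.Dict.getD_insert]
          by_cases hqp : q = p
          · subst hqp
            rw [if_pos rfl, hsplit, hQ, List.filter_cons_of_neg (by simp)]
            symm
            apply List.filter_eq_self.mpr
            intro h hh
            simp only [Bool.not_eq_eq_eq_not, Bool.not_true, beq_eq_false_iff_ne, ne_eq]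
            exact fun he => hmr (he ▸ hh)
          · rw [if_neg hqp, hq q hqm, hsplit]
            symm
            apply List.filter_eq_self.mpr
            intro h hh
            have hsw : PySem.Str.startswith h q = true := by
              simpa using List.of_mem_filter (List.mem_of_mem_filter hh)
            simp only [Bool.not_eq_eq_eq_not, Bool.not_true, beq_eq_false_iff_ne, ne_eq]
            intro he
            subst he
            exact absurd hsw (by rw [pv_excl h p q hp hqm (fun hx => hqp hx.symm) hm_sw]; simp)
lemma pvStepA_nil_fixed (S : List String) (oA : List String) :
    S.foldl (pvStepA []) oA = oA := by
  induction S generalizing oA with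
  | nil => rfl
  | cons tok t ih =>
    rw [List.foldl_cons]
    have : pvStepA [] oA tok = oA := by
      unfold pvStepA
      cases PySem.Dict.get? pvPF tok with
      | none => rfl
      | some p => simp [List.find?]
    rw [this, ih]
-- ===== VERDICT (by name: the statement is the Claim_ definition above) =====
theorem ordered_house_scan_refs_py_spec : Claim_equal_ordered_house_scan_refs_py := by
  intro g _
  unfold Spec_ordered_house_scan_refs_py ordered_house_scan_refs_py ordered_house_scan_refs_py_alt
  dsimp only
  generalize (PySem.Dict.getD (⟨g⟩ : PySem.Dict String (List String)) "houses" ([] : List String)) = raw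
  generalize (PySem.Dict.getD (⟨g⟩ : PySem.Dict String (List String)) "scan_order" ([] : List String)) = rawS
  rw [pvDedup_fold raw [] PySem.Set.empty (fun x => rfl), List.nil_append, pvStepB_align]
  by_cases hH : raw.filter (fun h => PySem.Str.strip h != "") = []
  · rw [if_pos (by simpa using hH)]
    have hD : pvDDF [] raw = [] := pvDDF_nil raw hH []
    rw [hD]
    obtain ⟨hb, hu', -⟩ := pvMainInd raw
      ((rawS.filter (fun x => PySem.Str.strip x != "")).map
        (fun x => PySem.Str.upper (PySem.Str.strip x)))
      [] (([] : List String).foldl pvAddQueue ⟨[("row", []), ("col", []), ("box", [])]⟩)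
      PySem.Set.empty (fun x => rfl)
      (by intro p hp; rw [hD]; fin_cases hp <;> rfl)
    rw [hb, hH, pvStepA_nil_fixed]
    simp
  · rw [if_neg (by simpa using hH)]
    obtain ⟨hb, hu', -⟩ := pvMainInd raw
      ((rawS.filter (fun x => PySem.Str.strip x != "")).map
        (fun x => PySem.Str.upper (PySem.Str.strip x)))
      [] ((pvDDF [] raw).foldl pvAddQueue ⟨[("row", []), ("col", []), ("box", [])]⟩)
      PySem.Set.empty (fun x => rfl)
      (by
        intro p hp
        rw [pvQueues_fold (pvDDF [] raw) _ p hp]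
        have hpre : (⟨[("row", []), ("col", []), ("box", [])]⟩ :
            PySem.Dict String (List String)).getD p [] = [] := by
          fin_cases hp <;> rfl
        rw [hpre, List.nil_append]
        symm
        apply List.filter_eq_self.mpr
        intro h _
        simp)
    rw [hb]
    have hpred : (fun h => !(PySem.Set.contains
        ((((rawS.filter (fun x => PySem.Str.strip x != "")).map
          (fun x => PySem.Str.upper (PySem.Str.strip x))).foldl pvStepB'
            ((pvDDF [] raw).foldl pvAddQueue ⟨[("row", []), ("col", []), ("box", [])]⟩,
              PySem.Set.empty, [])).2.1) h)) =
        (fun h => !(((rawS.filter (fun x => PySem.Str.strip x != "")).map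
          (fun x => PySem.Str.upper (PySem.Str.strip x))).foldl
            (pvStepA (raw.filter (fun h => PySem.Str.strip h != ""))) []).contains h) :=
      funext fun h => by rw [hu' h]
    rw [hpred, pvDDF_filter raw [] _, List.nil_append, pvPhase2]
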